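-- pv_equiv track=rewrite | github.com/Triglang/Artificial-Intelligence | Lab_Cuixj/Lab2/mgu.py | args_substitute
-- ===== SOURCE A (Python) =====
-- def is_predicate(val):
--     return val[0].isupper()
--
-- def args_substitute(args, unification):
--     newargs = []
--     for literal in args:
--         prefix = ""
--         suffix = ""
--         arg = literal
--         while is_predicate(arg):
--             begin = arg.find('(')
--             end = arg.rfind(')')
--             prefix += arg[:begin + 1]
--             suffix += arg[end:]
--             arg = arg[begin + 1:end]
--
--         if arg in unification:
--             newargs.append(prefix + unification[arg] + suffix)
--         else:
--             newargs.append(prefix + arg + suffix)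
--
--     return newargs
-- ===== SOURCE B (Python) =====
-- def is_predicate(val):
--     return val[0].isupper()
--
-- def frames(arg):
--     """Collect, outer-to-inner, the (prefix-piece, suffix-piece) frames of a
--     nested predicate string; return (frame list, innermost core)."""
--     if not is_predicate(arg):
--         return [], arg
--     b = arg.find('(')
--     e = arg.rfind(')')
--     fs, core = frames(arg[b + 1:e])
--     return [(arg[:b + 1], arg[e:])] + fs, core
--
-- def args_substitute(args, unification):
--     res = []
--     for lit in args:
--         fs, core = frames(lit)
--         res.append("".join(p for p, _ in fs)
--                    + unification.get(core, core)
--                    + "".join(s for _, s in fs))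
--     return res
-- ===== Notes on version B (the rewrite author's own statement) =====
-- stated objective: alternative
-- what changed: Replaces A's destructive while-loop with two mutable string accumulators by a staged decomposition: a recursive frames() first builds the explicit outer-to-inner list of (prefix-piece, suffix-piece) frames plus the innermost core, then the result is assembled by joining the prefix pieces, the dict.get-substituted core, and the suffix pieces.
-- outside the precondition, e.g. on args_substitute([''], {}): A raises IndexError, B raises IndexError; on args_substitute(['FOO'], {}): A raises IndexError, B raises IndexError
import Mathlib
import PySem

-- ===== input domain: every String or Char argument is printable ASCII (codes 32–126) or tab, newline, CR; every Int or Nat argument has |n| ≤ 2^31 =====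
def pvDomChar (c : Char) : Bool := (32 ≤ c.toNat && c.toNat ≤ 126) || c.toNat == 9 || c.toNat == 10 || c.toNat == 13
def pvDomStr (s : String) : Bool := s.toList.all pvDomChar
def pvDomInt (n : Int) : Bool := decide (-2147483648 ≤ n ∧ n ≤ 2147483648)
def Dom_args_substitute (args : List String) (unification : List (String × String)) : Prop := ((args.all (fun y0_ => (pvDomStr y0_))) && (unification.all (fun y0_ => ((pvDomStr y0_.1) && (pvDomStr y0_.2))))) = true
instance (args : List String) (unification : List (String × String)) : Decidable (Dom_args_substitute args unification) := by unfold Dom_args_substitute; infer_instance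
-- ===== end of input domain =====

-- B replaces A's while-loop with two mutable accumulators by a staged decomposition: build the
-- explicit outer-to-inner list of (prefix, suffix) frames, then assemble by joining the pieces
-- around the substituted core (objective: alternative).

-- ===== PORT A =====
-- is_predicate(val) = val[0].isupper(); Python raises IndexError on "", the port returns
-- false there (those inputs are excluded by Pre_args_substitute).
def isPredicateA (val : List Char) : Bool :=
  match PySem.List.pyGet? val 0 with
  | some c => PySem.Chars.isupper c
  | none => false

-- the while-loop of A; fuel only makes the recursion total, literal.length + 1 steps always
-- suffice because each iteration strictly shortens arg
def peelLoopA (fuel : Nat) (prefixAcc suffixAcc arg : List Char) :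
    List Char × List Char × List Char :=
  match fuel with
  | 0 => (prefixAcc, suffixAcc, arg)
  | f + 1 =>
    if isPredicateA arg then
      let b := PySem.Chars.find arg ['(']
      let e := PySem.Chars.rfind arg [')']
      peelLoopA f (prefixAcc ++ PySem.List.slice arg none (some (b + 1)))
                  (suffixAcc ++ PySem.List.slice arg (some e) none)
                  (PySem.List.slice arg (some (b + 1)) (some e))
    else (prefixAcc, suffixAcc, arg)

def args_substitute (args : List String) (unification : List (String × String)) : List String :=
  args.foldl (fun newargs literal =>
    let r := peelLoopA (literal.toList.length + 1) [] [] literal.toList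
    match List.lookup (String.ofList r.2.2) unification with
    | some v => newargs ++ [String.ofList (r.1 ++ v.toList ++ r.2.1)]
    | none   => newargs ++ [String.ofList (r.1 ++ r.2.2 ++ r.2.1)]) []

-- ===== PORT B =====
-- same Python helper is_predicate; on the nonempty lists Pre_ admits, val[0] is the head
def isPredB (val : List Char) : Bool :=
  match val with
  | [] => false
  | c :: _ => PySem.Chars.isupper c

-- frames(arg): the outer-to-inner list of (prefix-piece, suffix-piece) frames and the core;
-- fuel is only a totalization, arg.length + 1 always suffices
def framesB (fuel : Nat) (arg : List Char) : List (List Char × List Char) × List Char :=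
  match fuel with
  | 0 => ([], arg)
  | f + 1 =>
    if isPredB arg then
      let b := PySem.Chars.find arg ['(']
      let e := PySem.Chars.rfind arg [')']
      let r := framesB f (PySem.List.slice arg (some (b + 1)) (some e))
      ((PySem.List.slice arg none (some (b + 1)), PySem.List.slice arg (some e) none) :: r.1,
       r.2)
    else ([], arg)

def args_substitute_alt (args : List String) (unification : List (String × String)) : List String :=
  args.map (fun lit =>
    let r := framesB (lit.toList.length + 1) lit.toList
    String.ofList
      ((r.1.map Prod.fst).flatten
        ++ ((List.lookup (String.ofList r.2) unification).map String.toList).getD r.2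
        ++ (r.1.map Prod.snd).flatten))

-- ===== PRECONDITION & SPEC =====
-- Pre_ excludes exactly the inputs on which Python A raises IndexError (is_predicate("")):
-- some literal is empty, or peeling its nested predicate notation bottoms out in the empty
-- string.  B raises on exactly the same inputs.
-- pvOkArg checks, with at most |s| peeling steps (each step strictly shortens s, so the
-- depth bound is never the deciding factor), that the peel chain never reaches "".
def pvOkArg (depth : Nat) (s : List Char) : Bool :=
  match depth with
  | 0 => !s.isEmpty
  | d + 1 =>
    !s.isEmpty &&
    (if isPredicateA s then
       pvOkArg d (PySem.List.slice s (some (PySem.Chars.find s ['('] + 1))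
                                     (some (PySem.Chars.rfind s [')'])))
     else true)

def Pre_args_substitute (args : List String) (unification : List (String × String)) : Prop :=
  (args.all (fun l => pvOkArg l.toList.length l.toList)) = true

instance (args : List String) (unification : List (String × String)) :
    Decidable (Pre_args_substitute args unification) := by
  unfold Pre_args_substitute; infer_instance

def pvWitness_args_substitute : List String × (List (String × String)) :=
  (["F(G(x))", "y", "fa"], [("x", "a"), ("y", "b")])

def Spec_args_substitute (args : List String) (unification : List (String × String)) (out : List String) : Prop := out = args_substitute_alt args unification
instance (args : List String) (unification : List (String × String)) (out : List String) : Decidable (Spec_args_substitute args unification out) := by unfold Spec_args_substitute; infer_instance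

-- ===== CLAIM (what is proved, stated in full; the proofs are below) =====
def Claim_equal_args_substitute : Prop := ∀ (args : List String) (unification : List (String × String)), Dom_args_substitute args unification → Pre_args_substitute args unification → Spec_args_substitute args unification (args_substitute args unification)

-- ===== LEMMAS AND PROOFS =====

theorem isPred_eq (val : List Char) : isPredicateA val = isPredB val := by
  cases val <;> simp [isPredicateA, isPredB, PySem.List.pyGet?, PySem.List.pyIdx?]

-- A's accumulator loop computes the joined frames of B with the accumulators prepended
theorem peelLoopA_eq_framesB (fuel : Nat) :
    ∀ (arg pre suf : List Char),
      peelLoopA fuel pre suf arg =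
        (pre ++ ((framesB fuel arg).1.map Prod.fst).flatten,
         suf ++ ((framesB fuel arg).1.map Prod.snd).flatten,
         (framesB fuel arg).2) := by
  induction fuel with
  | zero => intro arg pre suf; simp [peelLoopA, framesB]
  | succ f ih =>
    intro arg pre suf
    by_cases h : isPredicateA arg
    · have hb : isPredB arg = true := by rw [← isPred_eq]; exact h
      simp only [peelLoopA, framesB, h, hb, if_pos]
      rw [ih]
      simp
    · have hb : isPredB arg = false := by rw [← isPred_eq]; simpa using h
      simp [peelLoopA, framesB, h, hb]

theorem foldl_acc (unification : List (String × String)) :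
    ∀ (l : List String) (acc : List String),
      l.foldl (fun newargs literal =>
        let r := peelLoopA (literal.toList.length + 1) [] [] literal.toList
        match List.lookup (String.ofList r.2.2) unification with
        | some v => newargs ++ [String.ofList (r.1 ++ v.toList ++ r.2.1)]
        | none   => newargs ++ [String.ofList (r.1 ++ r.2.2 ++ r.2.1)]) acc
      = acc ++ l.map (fun lit =>
          let r := framesB (lit.toList.length + 1) lit.toList
          String.ofList
            ((r.1.map Prod.fst).flatten
              ++ ((List.lookup (String.ofList r.2) unification).map String.toList).getD r.2
              ++ (r.1.map Prod.snd).flatten)) := by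
  intro l
  induction l with
  | nil => intro acc; simp
  | cons x xs ih =>
    intro acc
    simp only [List.foldl_cons, List.map_cons, ih]
    rw [peelLoopA_eq_framesB]
    cases h : List.lookup (String.ofList (framesB (x.toList.length + 1) x.toList).2) unification with
    | none => simp [h]
    | some v => simp [h]

-- ===== VERDICT (by name: the statement is the Claim_ definition above) =====
theorem args_substitute_spec : Claim_equal_args_substitute := by
  intro args unification _dom _pre
  unfold Spec_args_substitute args_substitute args_substitute_alt
  simpa using foldl_acc unification args []
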